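-- pv_equiv track=rewrite | github.com/SilviuSavu/Nautilus | backend/engines/factor/triple_bus_factor_engine.py | _get_factor_category
-- ===== SOURCE A (Python) =====
-- def _get_factor_category(factor_name: str) -> str:
--     """Categorize factor for optimization routing"""
--     if any(tech in factor_name.lower() for tech in ['sma', 'ema', 'rsi', 'macd', 'momentum']):
--         return 'technical'
--     elif any(stat in factor_name.lower() for stat in ['volatility', 'correlation', 'beta', 'sharpe']):
--         return 'statistical'
--     elif any(fund in factor_name.lower() for fund in ['pe_', 'pb_', 'roe', 'margin']):
--         return 'fundamental'
--     elif any(micro in factor_name.lower() for micro in ['spread', 'vpin', 'imbalance']):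
--         return 'microstructure'
--     else:
--         return 'alternative'
-- ===== SOURCE B (Python) =====
-- # B: priority-minimisation — scan ALL keywords of one flat (keyword, priority) table,
-- # keep the smallest matching priority, and index the category list once at the end.
-- _KEYWORDS = [
--     ('sma', 0), ('ema', 0), ('rsi', 0), ('macd', 0), ('momentum', 0),
--     ('volatility', 1), ('correlation', 1), ('beta', 1), ('sharpe', 1),
--     ('pe_', 2), ('pb_', 2), ('roe', 2), ('margin', 2),
--     ('spread', 3), ('vpin', 3), ('imbalance', 3),
-- ]
-- _CATEGORIES = ['technical', 'statistical', 'fundamental', 'microstructure', 'alternative']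
--
-- def _get_factor_category(factor_name: str) -> str:
--     low = factor_name.lower()
--     best = 4
--     for kw, pri in _KEYWORDS:
--         if pri < best and kw in low:
--             best = pri
--     return _CATEGORIES[best]
-- ===== Notes on version B (the rewrite author's own statement) =====
-- stated objective: alternative
-- what changed: Replaced the early-returning if/elif chain of per-category any() scans with a single full pass over a flat (keyword, priority) list that folds a minimum-priority accumulator and indexes a category array once at the end; lower() is computed once.
import Mathlib
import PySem

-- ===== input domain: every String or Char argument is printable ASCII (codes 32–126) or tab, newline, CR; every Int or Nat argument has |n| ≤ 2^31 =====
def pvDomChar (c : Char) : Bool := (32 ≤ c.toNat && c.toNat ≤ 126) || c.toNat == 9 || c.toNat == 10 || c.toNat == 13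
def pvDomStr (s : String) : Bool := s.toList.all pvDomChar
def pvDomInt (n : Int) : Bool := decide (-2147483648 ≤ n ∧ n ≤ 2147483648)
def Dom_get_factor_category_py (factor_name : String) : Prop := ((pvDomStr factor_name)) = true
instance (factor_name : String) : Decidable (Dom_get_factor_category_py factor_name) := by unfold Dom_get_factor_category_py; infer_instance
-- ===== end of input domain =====

-- B replaces A's early-return if/elif chain by one full pass folding a minimum-priority accumulator over a flat keyword table (alternative decomposition, same cost).


-- ===== PORT A =====
def get_factor_category_py (factor_name : String) : String :=
  if (["sma", "ema", "rsi", "macd", "momentum"] : List String).any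
      (fun tech => PySem.Str.isIn tech (PySem.Str.lower factor_name)) then "technical"
  else if (["volatility", "correlation", "beta", "sharpe"] : List String).any
      (fun stat => PySem.Str.isIn stat (PySem.Str.lower factor_name)) then "statistical"
  else if (["pe_", "pb_", "roe", "margin"] : List String).any
      (fun fund => PySem.Str.isIn fund (PySem.Str.lower factor_name)) then "fundamental"
  else if (["spread", "vpin", "imbalance"] : List String).any
      (fun micro => PySem.Str.isIn micro (PySem.Str.lower factor_name)) then "microstructure"
  else "alternative"

-- ===== PORT B =====
-- flat (keyword, priority) table of Source B
def pvKeywords : List (String × Nat) :=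
  [("sma", 0), ("ema", 0), ("rsi", 0), ("macd", 0), ("momentum", 0),
   ("volatility", 1), ("correlation", 1), ("beta", 1), ("sharpe", 1),
   ("pe_", 2), ("pb_", 2), ("roe", 2), ("margin", 2),
   ("spread", 3), ("vpin", 3), ("imbalance", 3)]

def pvCategories : List String :=
  ["technical", "statistical", "fundamental", "microstructure", "alternative"]

def get_factor_category_py_alt (factor_name : String) : String :=
  let low := PySem.Str.lower factor_name
  let best := pvKeywords.foldl
    (fun b kp => if kp.2 < b ∧ PySem.Str.isIn kp.1 low then kp.2 else b) 4
  pvCategories.getD best ""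

-- ===== PRECONDITION & SPEC =====
def Spec_get_factor_category_py (factor_name : String) (out : String) : Prop := out = get_factor_category_py_alt factor_name
instance (factor_name : String) (out : String) : Decidable (Spec_get_factor_category_py factor_name out) := by unfold Spec_get_factor_category_py; infer_instance

-- ===== CLAIM (what is proved, stated in full; the proofs are below) =====
def Claim_equal_get_factor_category_py : Prop := ∀ (factor_name : String), Dom_get_factor_category_py factor_name → Spec_get_factor_category_py factor_name (get_factor_category_py factor_name)

-- ===== LEMMAS AND PROOFS =====

-- folding one constant-priority keyword group updates the accumulator once, iff the group matches
theorem pvGroupFold (low : String) (p : Nat) (kws : List String) (b : Nat) :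
    (kws.map (fun k => (k, p))).foldl
      (fun b kp => if kp.2 < b ∧ PySem.Str.isIn kp.1 low then kp.2 else b) b
    = if p < b ∧ kws.any (fun k => PySem.Str.isIn k low) then p else b := by
  induction kws generalizing b with
  | nil => simp
  | cons k rest ih =>
    simp only [List.map, List.foldl, List.any_cons, Bool.or_eq_true]
    by_cases hk : p < b ∧ PySem.Str.isIn k low = true
    · rw [if_pos hk, ih]
      have h1 : ¬ (p < p ∧ (rest.any fun k => PySem.Str.isIn k low) = true) :=
        fun h => absurd h.1 (lt_irrefl p)
      rw [if_neg h1, if_pos ⟨hk.1, Or.inl hk.2⟩]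
    · rw [if_neg hk, ih]
      by_cases hp : p < b
      · have hkl : ¬ (PySem.Str.isIn k low = true) := fun h => hk ⟨hp, h⟩
        by_cases hr : (rest.any fun k => PySem.Str.isIn k low) = true
        · rw [if_pos ⟨hp, hr⟩, if_pos ⟨hp, Or.inr hr⟩]
        · rw [if_neg (fun h => hr h.2), if_neg (fun h => h.2.elim hkl hr)]
      · rw [if_neg (fun h => hp h.1), if_neg (fun h => hp h.1)]

theorem pvKeywords_eq :
    pvKeywords =
      (["sma", "ema", "rsi", "macd", "momentum"].map (fun k => (k, 0)))
      ++ (["volatility", "correlation", "beta", "sharpe"].map (fun k => (k, 1)))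
      ++ (["pe_", "pb_", "roe", "margin"].map (fun k => (k, 2)))
      ++ (["spread", "vpin", "imbalance"].map (fun k => (k, 3))) := rfl

-- ===== VERDICT (by name: the statement is the Claim_ definition above) =====
theorem get_factor_category_py_spec : Claim_equal_get_factor_category_py := by
  intro factor_name _
  unfold Spec_get_factor_category_py get_factor_category_py get_factor_category_py_alt
  simp only [pvKeywords_eq, List.foldl_append, pvGroupFold]
  by_cases h1 : (["sma", "ema", "rsi", "macd", "momentum"] : List String).any
      (fun k => PySem.Str.isIn k (PySem.Str.lower factor_name)) <;>
  by_cases h2 : (["volatility", "correlation", "beta", "sharpe"] : List String).any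
      (fun k => PySem.Str.isIn k (PySem.Str.lower factor_name)) <;>
  by_cases h3 : (["pe_", "pb_", "roe", "margin"] : List String).any
      (fun k => PySem.Str.isIn k (PySem.Str.lower factor_name)) <;>
  by_cases h4 : (["spread", "vpin", "imbalance"] : List String).any
      (fun k => PySem.Str.isIn k (PySem.Str.lower factor_name)) <;>
  simp only [h1, h2, h3, h4] <;> decide
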